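-- pv_equiv track=rewrite | github.com/joel-tuberosa/psgfinder | psgfindertools/dna.py | map_gap_coordinates
-- ===== SOURCE A (Python) =====
-- def map_gap_coordinates(gap_map):
--     '''returns a list of gaps coordinates'''
--     c = []
--     switch = 0
--     for i in range(len(gap_map)):
--         if gap_map[i] != '-':
--             if switch == 0:
--                 continue
--             else:
--                 if i != 0: c[-1] += [i]
--                 switch = 0
--         else:
--             if switch == 0:
--                 c.append([i])
--                 switch = 1
--             else:
--                 continue
--     if len(c[-1]) == 1: c[-1].append(len(gap_map))
--     return c
-- ===== SOURCE B (Python) =====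
-- def map_gap_coordinates(gap_map):
--     '''returns a list of gaps coordinates'''
--     c = []
--     n = len(gap_map)
--     i = 0
--     while i < n:
--         if gap_map[i] == '-':
--             j = i + 1
--             while j < n and gap_map[j] == '-':
--                 j += 1
--             c.append([i, j])
--             i = j
--         else:
--             i += 1
--     return c
-- ===== Notes on version B (the rewrite author's own statement) =====
-- stated objective: simpler
-- what changed: A's char-by-char state machine with a switch flag and in-place mutation of the last appended pair is replaced by a run-skipping scan that, on hitting a '-', finds the end of the whole gap run and appends the complete [start, end] pair at once, with no switch state and no end-of-loop fixup.
-- crash fix: On any input containing no '-' at all, A raises IndexError at the final c[-1] access; B returns the empty list. — e.g. on map_gap_coordinates("AC"): A raises IndexError, B returns []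
import Mathlib
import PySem

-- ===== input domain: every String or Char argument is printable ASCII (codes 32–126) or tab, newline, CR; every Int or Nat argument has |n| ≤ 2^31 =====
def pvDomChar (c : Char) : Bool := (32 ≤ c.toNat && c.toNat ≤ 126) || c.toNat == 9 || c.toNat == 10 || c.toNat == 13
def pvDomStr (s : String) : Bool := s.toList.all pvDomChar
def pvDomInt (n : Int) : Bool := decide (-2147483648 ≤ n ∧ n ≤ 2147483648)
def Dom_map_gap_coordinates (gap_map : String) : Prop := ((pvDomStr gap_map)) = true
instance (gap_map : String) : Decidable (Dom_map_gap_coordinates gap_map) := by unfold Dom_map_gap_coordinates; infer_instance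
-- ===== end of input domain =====

-- B replaces A's char-by-char switch/last-element-mutation state machine by a run-skipping scan
-- that emits each gap interval [start, end] in one piece (objective: simpler; return value only).

-- ===== PORT A =====
-- loop body of A's for-loop: state is (c, switch)
def pvStepA (st : List (List Int) × Int) (ich : Int × Char) : List (List Int) × Int :=
  if ich.2 ≠ '-' then
    if st.2 = 0 then st
    else ((if ich.1 ≠ 0 then st.1.dropLast ++ [st.1.getLast?.getD [] ++ [ich.1]] else st.1), 0)
  else
    if st.2 = 0 then (st.1 ++ [[ich.1]], 1) else st

-- final `if len(c[-1]) == 1: c[-1].append(len(gap_map))`; `c[-1]` raises IndexError on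
-- an empty c (no gap anywhere) — excluded by Pre_; the none branch is unreachable under Pre_
def pvFinish (st : List (List Int) × Int) (n : Int) : List (List Int) :=
  match st.1.getLast? with
  | none => []
  | some last => if last.length = 1 then st.1.dropLast ++ [last ++ [n]] else st.1

def map_gap_coordinates (gap_map : String) : List (List Int) :=
  pvFinish
    ((PySem.List.pyRange 0 (gap_map.toList.length : Int) 1).foldl
      (fun st i =>
        match PySem.List.pyGet? gap_map.toList i with
        | none => st
        | some ch => pvStepA st (i, ch)) (([] : List (List Int)), (0 : Int)))
    (gap_map.toList.length : Int)

-- ===== PORT B =====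
-- length of the leading run of '-'
def gapRunLen : List Char → Nat
  | '-' :: rest => gapRunLen rest + 1
  | _ => 0

-- B's while-loop: scan, and on a gap emit [i, j] where j skips the whole run
def gapsFrom : List Char → Int → List (List Int)
  | [], _ => []
  | ch :: rest, p =>
    if ch = '-' then
      let k := gapRunLen rest
      [p, p + 1 + (k : Int)] :: gapsFrom (rest.drop k) (p + 1 + (k : Int))
    else gapsFrom rest (p + 1)
termination_by l _ => l.length
decreasing_by
  · simp only [List.length_drop, List.length_cons]; omega
  · simp

def map_gap_coordinates_alt (gap_map : String) : List (List Int) :=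
  gapsFrom gap_map.toList 0

-- ===== PRECONDITION & SPEC =====
-- Pre_ excludes exactly the inputs with no '-' at all, on which the Python A raises IndexError
-- at the final `c[-1]` access.
def Pre_map_gap_coordinates (gap_map : String) : Prop := '-' ∈ gap_map.toList
instance (gap_map : String) : Decidable (Pre_map_gap_coordinates gap_map) := by
  unfold Pre_map_gap_coordinates; infer_instance

def pvWitness_map_gap_coordinates : String := "-a-"

-- A raises IndexError on any input containing no '-'; B returns the empty list there.
def Raises_map_gap_coordinates (gap_map : String) : Prop := ¬ ('-' ∈ gap_map.toList)
instance (gap_map : String) : Decidable (Raises_map_gap_coordinates gap_map) := by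
  unfold Raises_map_gap_coordinates; infer_instance
def pvRaiseWitness_map_gap_coordinates : String := "AC"
def pvRaiseWitnessOut_map_gap_coordinates : List (List Int) := []

def Spec_map_gap_coordinates (gap_map : String) (out : List (List Int)) : Prop :=
  out = map_gap_coordinates_alt gap_map
instance (gap_map : String) (out : List (List Int)) : Decidable (Spec_map_gap_coordinates gap_map out) := by
  unfold Spec_map_gap_coordinates; infer_instance

-- ===== CLAIM (what is proved, stated in full; the proofs are below) =====
def Claim_equal_map_gap_coordinates : Prop := ∀ (gap_map : String), Dom_map_gap_coordinates gap_map → Pre_map_gap_coordinates gap_map → Spec_map_gap_coordinates gap_map (map_gap_coordinates gap_map)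

def Claim_raises_map_gap_coordinates : Prop := (∀ (gap_map : String), Dom_map_gap_coordinates gap_map → Raises_map_gap_coordinates gap_map → ¬ Pre_map_gap_coordinates gap_map) ∧ (Dom_map_gap_coordinates (pvRaiseWitness_map_gap_coordinates) ∧ Raises_map_gap_coordinates (pvRaiseWitness_map_gap_coordinates) ∧ map_gap_coordinates_alt (pvRaiseWitness_map_gap_coordinates) = pvRaiseWitnessOut_map_gap_coordinates)

-- ===== LEMMAS AND PROOFS =====

-- fold over range(len(l)) with l[i] = fold over enumerate(l)
theorem pvFoldRangeEnum {σ : Type} (full : List Char) (f : σ → Int × Char → σ) (a : Nat) (st : σ) :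
    (PySem.List.pyRange (a : Int) (full.length : Int) 1).foldl
        (fun s i => match PySem.List.pyGet? full i with | none => s | some ch => f s (i, ch)) st
      = (PySem.List.enumerate (full.drop a) (a : Int)).foldl f st := by
  induction h : full.length - a generalizing a st with
  | zero =>
    have ha : (full.length : Int) ≤ (a : Int) := by exact_mod_cast Nat.le_of_sub_eq_zero h
    rw [PySem.List.pyRange_one_eq_nil ha, List.drop_eq_nil_of_le (by omega),
      PySem.List.enumerate_nil]
    rfl
  | succ n ih =>
    have hlt : a < full.length := by omega
    have hlt' : (a : Int) < (full.length : Int) := by exact_mod_cast hlt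
    rw [PySem.List.pyRange_one_cons hlt']
    have hdrop : full.drop a = full[a] :: full.drop (a + 1) := (List.getElem_cons_drop hlt).symm
    rw [hdrop, PySem.List.enumerate_cons, List.foldl_cons, List.foldl_cons,
      PySem.List.pyGet?_natCast]
    simp only [List.getElem?_eq_getElem hlt]
    rw [show ((a : Int) + 1) = ((a + 1 : Nat) : Int) from by push_cast; ring]
    exact ih (a + 1) _ (by omega)

-- the "finish" step expressed through the switch: append n to the open run iff the switch is on
def pvOut (st : List (List Int) × Int) (n : Int) : List (List Int) :=
  if st.2 = 0 then st.1 else st.1.dropLast ++ [st.1.getLast?.getD [] ++ [n]]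

-- shape invariant of A's loop state
def pvGoodSt (st : List (List Int) × Int) : Prop :=
  (st.2 = 0 ∧ ∀ x ∈ st.1, x.length = 2) ∨
  (st.2 = 1 ∧ ∃ c0 s, st.1 = c0 ++ [[s]] ∧ ∀ x ∈ c0, x.length = 2)

theorem pvMain (l : List Char) :
    (∀ (p : Int) (c : List (List Int)), 0 ≤ p → (∀ x ∈ c, x.length = 2) →
      pvOut ((PySem.List.enumerate l p).foldl pvStepA (c, 0)) (p + l.length)
          = c ++ gapsFrom l p
        ∧ pvGoodSt ((PySem.List.enumerate l p).foldl pvStepA (c, 0)))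
    ∧ (∀ (p s : Int) (c : List (List Int)), 0 ≤ s → s < p → (∀ x ∈ c, x.length = 2) →
      pvOut ((PySem.List.enumerate l p).foldl pvStepA (c ++ [[s]], 1)) (p + l.length)
          = c ++ [s, p + (gapRunLen l : Int)] :: gapsFrom (l.drop (gapRunLen l)) (p + (gapRunLen l : Int))
        ∧ pvGoodSt ((PySem.List.enumerate l p).foldl pvStepA (c ++ [[s]], 1))) := by
  induction l with
  | nil =>
    constructor
    · intro p c _ hc
      refine ⟨?_, Or.inl ⟨rfl, hc⟩⟩
      simp [PySem.List.enumerate_nil, pvOut, gapsFrom]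
    · intro p s c hs hsp hc
      refine ⟨?_, Or.inr ⟨rfl, c, s, rfl, hc⟩⟩
      simp [PySem.List.enumerate_nil, pvOut, gapsFrom, gapRunLen]
  | cons ch rest ih =>
    obtain ⟨ih0, ih1⟩ := ih
    constructor
    · intro p c hp hc
      rw [PySem.List.enumerate_cons, List.foldl_cons,
        show p + ((ch :: rest).length : Int) = p + 1 + (rest.length : Int) from by
          push_cast [List.length_cons]; ring]
      by_cases hch : ch = '-'
      · subst hch
        rw [show pvStepA (c, 0) (p, '-') = (c ++ [[p]], 1) from by simp [pvStepA]]
        obtain ⟨h1, h2⟩ := ih1 (p + 1) p c hp (by omega) hc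
        refine ⟨?_, h2⟩
        rw [h1,
          show gapsFrom ('-' :: rest) p
            = [p, p + 1 + (gapRunLen rest : Int)]
              :: gapsFrom (rest.drop (gapRunLen rest)) (p + 1 + (gapRunLen rest : Int)) from by
            rw [gapsFrom]; simp]
      · rw [show pvStepA (c, 0) (p, ch) = (c, 0) from by simp [pvStepA, hch]]
        obtain ⟨h1, h2⟩ := ih0 (p + 1) c (by omega) hc
        refine ⟨?_, h2⟩
        rw [h1, show gapsFrom (ch :: rest) p = gapsFrom rest (p + 1) from by
          rw [gapsFrom]; simp [hch]]
    · intro p s c hs hsp hc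
      rw [PySem.List.enumerate_cons, List.foldl_cons,
        show p + ((ch :: rest).length : Int) = p + 1 + (rest.length : Int) from by
          push_cast [List.length_cons]; ring]
      by_cases hch : ch = '-'
      · subst hch
        rw [show pvStepA (c ++ [[s]], 1) (p, '-') = (c ++ [[s]], 1) from by simp [pvStepA]]
        obtain ⟨h1, h2⟩ := ih1 (p + 1) s c hs (by omega) hc
        refine ⟨?_, h2⟩
        rw [h1,
          show gapRunLen ('-' :: rest) = gapRunLen rest + 1 from rfl,
          show ('-' :: rest).drop (gapRunLen rest + 1) = rest.drop (gapRunLen rest) from by simp,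
          show p + ((gapRunLen rest + 1 : Nat) : Int) = p + 1 + (gapRunLen rest : Int) from by
            push_cast; ring]
      · have hp0 : p ≠ 0 := by omega
        rw [show pvStepA (c ++ [[s]], 1) (p, ch) = (c ++ [[s, p]], 0) from by
          simp [pvStepA, hch, hp0]]
        obtain ⟨h1, h2⟩ := ih0 (p + 1) (c ++ [[s, p]]) (by omega)
          (by intro x hx; rcases List.mem_append.1 hx with h | h
              · exact hc x h
              · simp at h; subst h; rfl)
        refine ⟨?_, h2⟩
        rw [h1,
          show gapRunLen (ch :: rest) = 0 from by unfold gapRunLen; cases rest <;> simp_all]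
        simp only [Nat.cast_zero, add_zero, List.drop_zero]
        rw [show gapsFrom (ch :: rest) p = gapsFrom rest (p + 1) from by
          rw [gapsFrom]; simp [hch]]
        simp

-- the final fixup of A equals pvOut on any state satisfying the invariant
theorem pvFixup (st : List (List Int) × Int) (n : Int) (h : pvGoodSt st) :
    pvFinish st n = pvOut st n := by
  rcases h with ⟨h2, hall⟩ | ⟨h2, c0, s, hst, _⟩
  · cases hlast : st.1.getLast? with
    | none =>
      have : st.1 = [] := List.getLast?_eq_none_iff.mp hlast
      simp [pvFinish, pvOut, h2, this]
    | some last =>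
      have hlen : last.length = 2 := hall last (List.mem_of_getLast? hlast)
      simp [pvFinish, pvOut, h2, hlast, hlen]
  · simp [pvFinish, pvOut, h2, hst]

theorem pvPorts_agree (gap_map : String) :
    map_gap_coordinates gap_map = map_gap_coordinates_alt gap_map := by
  unfold map_gap_coordinates map_gap_coordinates_alt
  have hb := pvFoldRangeEnum (σ := List (List Int) × Int) gap_map.toList pvStepA 0
    (([] : List (List Int)), (0 : Int))
  simp only [Nat.cast_zero, List.drop_zero] at hb
  rw [hb]
  obtain ⟨h1, h2⟩ := (pvMain gap_map.toList).1 0 [] le_rfl (by intro x hx; cases hx)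
  rw [pvFixup _ _ h2]
  simpa using h1

-- ===== VERDICT (by name: the statement is the Claim_ definition above) =====
theorem map_gap_coordinates_spec : Claim_equal_map_gap_coordinates := by
  intro gap_map _ _
  unfold Spec_map_gap_coordinates
  exact pvPorts_agree gap_map

theorem map_gap_coordinates_raises : Claim_raises_map_gap_coordinates := by
  unfold Claim_raises_map_gap_coordinates
  refine ⟨fun _ _ h => h, by decide, by decide, ?_⟩
  show gapsFrom "AC".toList 0 = []
  rw [show "AC".toList = ['A', 'C'] from by decide]
  rw [gapsFrom]
  simp [gapsFrom]

-- self-check: the raise-witness value asserted by map_gap_coordinates_raises is B's port's output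
theorem pvRaiseWitnessValue_ok :
    map_gap_coordinates_alt pvRaiseWitness_map_gap_coordinates
      = pvRaiseWitnessOut_map_gap_coordinates :=
  map_gap_coordinates_raises.2.2.2
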